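-- pv_equiv track=rewrite | github.com/CarlosHernandezP/Pose_extraction_comparison | shot_detector/shot_mapper.py | map_shot_to_class
-- ===== SOURCE A (Python) =====
-- from typing import Dict, List, Optional, Set
--
-- DEFAULT_SHOT_MAPPING = {
--     'forehand': [
--         'forehand',
--         'forehand_volley',
--         'forehand_wall_exit',
--         'forehand_contrapared',
--         'flat_smash',
--         'topspin_smash',
--         'vibora',
--         'bandeja',
--         'bajada'
--     ],
--     'backhand': [
--         'backhand',
--         'backhand_volley',
--         'backhand_wall_exit'
--     ],
--     'serve': [
--         'serve'
--     ],
--     'idle': [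
--         'idle'
--     ]
-- }
--
-- def map_shot_to_class(shot_type: str, mapping: Optional[Dict[str, List[str]]] = None) -> Optional[str]:
--     """
--     Maps a single shot type to an aggregated class.
--
--     Parameters
--     ----------
--     shot_type : str
--         The shot type to map (e.g., 'forehand_volley', 'serve')
--     mapping : dict, optional
--         Mapping dictionary. If None, uses DEFAULT_SHOT_MAPPING.
--
--     Returns
--     -------
--     str or None
--         The aggregated class name, or None if shot_type is not found in mapping.
--     """
--     if mapping is None:
--         mapping = DEFAULT_SHOT_MAPPING
--
--     # Filter out invalid shot types
--     if shot_type is None or str(shot_type).strip().lower() == 'shot':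
--         return None
--
--     shot_type = str(shot_type).strip().lower()
--
--     # Search for shot_type in mapping
--     for class_name, shot_list in mapping.items():
--         if shot_type in [s.lower() for s in shot_list]:
--             return class_name
--
--     return None
-- ===== SOURCE B (Python) =====
-- DEFAULT_SHOT_MAPPING = {
--     'forehand': [
--         'forehand', 'forehand_volley', 'forehand_wall_exit', 'forehand_contrapared',
--         'flat_smash', 'topspin_smash', 'vibora', 'bandeja', 'bajada'
--     ],
--     'backhand': ['backhand', 'backhand_volley', 'backhand_wall_exit'],
--     'serve': ['serve'],
--     'idle': ['idle']
-- }
--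
-- def map_shot_to_class(shot_type, mapping=None):
--     if mapping is None:
--         mapping = DEFAULT_SHOT_MAPPING
--     if shot_type is None:
--         return None
--     key = str(shot_type).strip().lower()
--     if key == 'shot':
--         return None
--     index = {}
--     for class_name, shot_list in mapping.items():
--         for s in shot_list:
--             index.setdefault(s.lower(), class_name)
--     return index.get(key)
-- ===== Notes on version B (the rewrite author's own statement) =====
-- stated objective: idiomatic
-- what changed: Replaced the per-call nested scan (lowering every shot list on each call) by a single index-building pass with dict.setdefault (first class wins, matching A's first-match loop) followed by one dict lookup.
import Mathlib
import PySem

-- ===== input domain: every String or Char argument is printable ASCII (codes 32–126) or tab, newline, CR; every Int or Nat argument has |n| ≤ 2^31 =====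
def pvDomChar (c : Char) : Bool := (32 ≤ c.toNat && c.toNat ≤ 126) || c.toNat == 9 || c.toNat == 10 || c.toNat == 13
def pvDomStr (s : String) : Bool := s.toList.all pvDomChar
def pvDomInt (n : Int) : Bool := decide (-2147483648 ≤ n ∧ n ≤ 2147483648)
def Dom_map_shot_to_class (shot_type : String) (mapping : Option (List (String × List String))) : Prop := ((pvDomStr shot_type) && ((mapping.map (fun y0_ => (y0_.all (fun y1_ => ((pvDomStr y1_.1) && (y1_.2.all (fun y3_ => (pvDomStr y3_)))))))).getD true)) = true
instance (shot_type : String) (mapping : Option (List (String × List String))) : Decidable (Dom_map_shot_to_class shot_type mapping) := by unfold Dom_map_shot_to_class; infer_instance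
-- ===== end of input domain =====

-- B changes the strategy: instead of A's per-class nested scan, B builds a reverse index
-- (first class wins, via setdefault) in one pass and answers with a single dict lookup;
-- objective: idiomatic. Return values are proved equal everywhere; neither mutates its inputs.

-- module-level constant, shared by both Pythons
def DEFAULT_SHOT_MAPPING : List (String × List String) :=
  [("forehand", ["forehand", "forehand_volley", "forehand_wall_exit", "forehand_contrapared",
                 "flat_smash", "topspin_smash", "vibora", "bandeja", "bajada"]),
   ("backhand", ["backhand", "backhand_volley", "backhand_wall_exit"]),
   ("serve", ["serve"]),
   ("idle", ["idle"])]

-- ===== PORT A =====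
-- 'for class_name, shot_list in mapping.items(): if shot_type in [s.lower() for s in shot_list]: return class_name'
def pvALoop (st : String) : List (String × List String) → Option String
  | [] => none
  | (class_name, shot_list) :: rest =>
      if st ∈ shot_list.map PySem.Str.lower then some class_name else pvALoop st rest

def map_shot_to_class (shot_type : String) (mapping : Option (List (String × List String))) : Option String :=
  let m := mapping.getD DEFAULT_SHOT_MAPPING
  -- shot_type : str here, so 'shot_type is None' is False and str(shot_type) is shot_type
  if PySem.Str.lower (PySem.Str.strip shot_type) = "shot" then none
  else
    let shot_type := PySem.Str.lower (PySem.Str.strip shot_type)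
    pvALoop shot_type m

-- ===== PORT B =====
-- 'for class_name, shot_list in mapping.items(): for s in shot_list: index.setdefault(s.lower(), class_name)'
def pvBuildIndex (m : List (String × List String)) : PySem.Dict String String :=
  m.foldl (fun d p =>
    p.2.foldl (fun d s => d.setdefault (PySem.Str.lower s) p.1) d) PySem.Dict.empty

def map_shot_to_class_alt (shot_type : String) (mapping : Option (List (String × List String))) : Option String :=
  let m := mapping.getD DEFAULT_SHOT_MAPPING
  let key := PySem.Str.lower (PySem.Str.strip shot_type)
  if key = "shot" then none
  else (pvBuildIndex m).get? key

-- ===== PRECONDITION & SPEC =====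
def Spec_map_shot_to_class (shot_type : String) (mapping : Option (List (String × List String))) (out : Option String) : Prop := out = map_shot_to_class_alt shot_type mapping
instance (shot_type : String) (mapping : Option (List (String × List String))) (out : Option String) : Decidable (Spec_map_shot_to_class shot_type mapping out) := by unfold Spec_map_shot_to_class; infer_instance

-- ===== CLAIM (what is proved, stated in full; the proofs are below) =====
def Claim_equal_map_shot_to_class : Prop := ∀ (shot_type : String) (mapping : Option (List (String × List String))), Dom_map_shot_to_class shot_type mapping → Spec_map_shot_to_class shot_type mapping (map_shot_to_class shot_type mapping)

-- ===== LEMMAS AND PROOFS =====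

-- setdefault over one shot list only fills keys absent from d
theorem pv_inner_get? (k cn : String) (sl : List String) (d : PySem.Dict String String) :
    (sl.foldl (fun d s => d.setdefault (PySem.Str.lower s) cn) d).get? k
      = (d.get? k).or (if k ∈ sl.map PySem.Str.lower then some cn else none) := by
  induction sl generalizing d with
  | nil => simp
  | cons s sl ih =>
      simp only [List.foldl_cons, ih, List.map_cons, List.mem_cons]
      by_cases h : k = PySem.Str.lower s
      · subst h
        rw [PySem.Dict.get?_setdefault_self]
        cases d.get? (PySem.Str.lower s) <;> simp [Option.or]
      · rw [PySem.Dict.get?_setdefault_of_ne (hne := h)]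
        simp [h]

-- the whole index lookup equals A's first-match scan
theorem pv_outer_get? (k : String) (m : List (String × List String)) (d : PySem.Dict String String) :
    (m.foldl (fun d p => p.2.foldl (fun d s => d.setdefault (PySem.Str.lower s) p.1) d) d).get? k
      = (d.get? k).or (pvALoop k m) := by
  induction m generalizing d with
  | nil => simp [pvALoop]
  | cons p m ih =>
      simp only [List.foldl_cons, ih, pv_inner_get?, pvALoop]
      cases hd : d.get? k <;> by_cases h : k ∈ p.2.map PySem.Str.lower <;>
        simp [h, Option.or]

theorem pvBuildIndex_get? (k : String) (m : List (String × List String)) :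
    (pvBuildIndex m).get? k = pvALoop k m := by
  simpa [pvBuildIndex, Option.or] using pv_outer_get? k m PySem.Dict.empty

-- ===== VERDICT (by name: the statement is the Claim_ definition above) =====
theorem map_shot_to_class_spec : Claim_equal_map_shot_to_class := by
  intro shot_type mapping _
  unfold Spec_map_shot_to_class map_shot_to_class map_shot_to_class_alt
  by_cases h : PySem.Str.lower (PySem.Str.strip shot_type) = "shot" <;>
    simp [h, pvBuildIndex_get?]
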